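-- pv_equiv track=rewrite | github.com/asevillasastre/Carcassonne | carcassonne-old-versions/carcassonne-2020-unfinished.py | rotaciones
-- ===== SOURCE A (Python) =====
-- def rotaciones(pieza):
--     result=[]
--     for i in range(len(pieza)):
--         pie=[]
--         j=0
--         while j<len(pieza):
--             pie.append(pieza[(i+j)%len(pieza)])
--             j+=1
--         result.append(pie)
--     return result
-- ===== SOURCE B (Python) =====
-- def rotaciones(pieza):
--     return [pieza[i:] + pieza[:i] for i in range(len(pieza))]
-- ===== Notes on version B (the rewrite author's own statement) =====
-- stated objective: idiomatic
-- what changed: Each rotation is produced as the concatenation of two contiguous slices pieza[i:] + pieza[:i] in a single comprehension, replacing the element-by-element inner while loop with modular indexing (bulk slice copies vs per-element index arithmetic).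
import Mathlib
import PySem

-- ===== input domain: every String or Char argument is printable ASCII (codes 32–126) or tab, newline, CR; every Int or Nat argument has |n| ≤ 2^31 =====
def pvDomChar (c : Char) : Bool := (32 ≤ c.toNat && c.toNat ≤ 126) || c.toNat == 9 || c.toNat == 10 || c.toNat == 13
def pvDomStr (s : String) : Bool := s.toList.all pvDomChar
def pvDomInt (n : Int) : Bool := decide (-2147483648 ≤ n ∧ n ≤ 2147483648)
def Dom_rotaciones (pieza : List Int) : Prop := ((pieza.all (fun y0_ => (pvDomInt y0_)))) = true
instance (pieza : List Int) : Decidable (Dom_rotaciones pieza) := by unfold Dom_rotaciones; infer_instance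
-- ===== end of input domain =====

-- B builds each rotation as the concatenation of two contiguous slices pieza[i:] + pieza[:i]
-- instead of A's element-by-element inner while loop with modular indexing; same O(n^2) cost, more idiomatic.

-- ===== PORT A =====
-- inner while loop: 'while j < len(pieza): pie.append(pieza[(i+j)%len(pieza)]); j += 1'
-- (the index (i+j)%len is always in range, so the getD default 0 is never used)
def pieLoop (pieza : List Int) (i : Int) (pie : List Int) (j : Nat) : List Int :=
  if j < pieza.length then
    pieLoop pieza i
      (pie ++ [PySem.List.pyGetD pieza (PySem.Int.mod (i + (j : Int)) (pieza.length : Int)) 0])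
      (j + 1)
  else pie
termination_by pieza.length - j

def rotaciones (pieza : List Int) : List (List Int) :=
  (PySem.List.pyRange 0 (pieza.length : Int) 1).foldl
    (fun result i => result ++ [pieLoop pieza i [] 0]) []

-- ===== PORT B =====
def rotaciones_alt (pieza : List Int) : List (List Int) :=
  (PySem.List.pyRange 0 (pieza.length : Int) 1).map
    (fun i => PySem.List.slice pieza (some i) none ++ PySem.List.slice pieza none (some i))

-- ===== PRECONDITION & SPEC =====
def Spec_rotaciones (pieza : List Int) (out : List (List Int)) : Prop := out = rotaciones_alt pieza
instance (pieza : List Int) (out : List (List Int)) : Decidable (Spec_rotaciones pieza out) := by unfold Spec_rotaciones; infer_instance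

-- ===== CLAIM (what is proved, stated in full; the proofs are below) =====
def Claim_equal_rotaciones : Prop := ∀ (pieza : List Int), Dom_rotaciones pieza → Spec_rotaciones pieza (rotaciones pieza)

-- ===== LEMMAS AND PROOFS =====

-- the (i+j) % n element of pieza is the j-th element of the rotation drop i ++ take i
lemma rot_elem (pieza : List Int) (i j : Nat) (hi : i < pieza.length) (hj : j < pieza.length) :
    pieza.getD ((i + j) % pieza.length) 0 = (pieza.drop i ++ pieza.take i).getD j 0 := by
  rw [List.getD_eq_getElem?_getD, List.getD_eq_getElem?_getD]
  by_cases h : i + j < pieza.length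
  · rw [Nat.mod_eq_of_lt h,
      List.getElem?_append_left (by simp; omega : j < (pieza.drop i).length),
      List.getElem?_drop]
  · have hmod : (i + j) % pieza.length = i + j - pieza.length := by
      rw [Nat.mod_eq_sub_mod (by omega)]
      exact Nat.mod_eq_of_lt (by omega)
    rw [hmod, List.getElem?_append_right (by simp; omega : (pieza.drop i).length ≤ j),
      List.getElem?_take]
    rw [if_pos (by simp; omega)]
    have he : j - (pieza.drop i).length = i + j - pieza.length := by simp; omega
    rw [he]

-- loop invariant: the while loop appends the suffix of the rotation starting at j
lemma pieLoop_eq (pieza : List Int) (i : Nat) (hi : i < pieza.length) :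
    ∀ k j pie, pieza.length - j = k →
      pieLoop pieza (i : Int) pie j = pie ++ (pieza.drop i ++ pieza.take i).drop j := by
  intro k
  induction k with
  | zero =>
    intro j pie hk
    rw [pieLoop, if_neg (by omega), List.drop_eq_nil_of_le (by simp; omega)]
    simp
  | succ k ih =>
    intro j pie hk
    have hj : j < pieza.length := by omega
    rw [pieLoop, if_pos hj, ih (j + 1) _ (by omega)]
    have hcast : (i : Int) + (j : Int) = ((i + j : Nat) : Int) := by push_cast; ring
    rw [hcast, PySem.Int.mod_natCast, PySem.List.pyGetD_natCast, rot_elem pieza i j hi hj]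
    have hjr : j < (pieza.drop i ++ pieza.take i).length := by simp; omega
    rw [List.drop_eq_getElem_cons hjr, List.getD_eq_getElem?_getD,
      List.getElem?_eq_getElem hjr]
    simp

-- ===== VERDICT (by name: the statement is the Claim_ definition above) =====
theorem rotaciones_spec : Claim_equal_rotaciones := by
  intro pieza _
  unfold Spec_rotaciones rotaciones rotaciones_alt
  rw [PySem.List.foldl_append_singleton_eq_map, List.nil_append]
  refine List.map_congr_left ?_
  intro i hi
  rw [PySem.List.mem_pyRange_one] at hi
  obtain ⟨h0, hn⟩ := hi
  obtain ⟨iN, rfl⟩ := Int.eq_ofNat_of_zero_le h0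
  have hiN : iN < pieza.length := by exact_mod_cast hn
  rw [PySem.List.slice_from pieza h0, PySem.List.slice_to pieza h0]
  rw [pieLoop_eq pieza iN hiN pieza.length 0 [] (by omega)]
  simp
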